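-- pv_equiv track=rewrite | github.com/violetDelia/kernelcode_generate | kernel_gen/passes/lowering/tile.py | _loop_axes_from_roles
-- ===== SOURCE A (Python) =====
-- class TilePassError(ValueError):
--     """tile pass 的显式错误类型。
--
--     创建者: 小李飞刀
--     最后一次更改: 小李飞刀
--
--     功能说明:
--     - 统一承载 `TilePass*` 关键短语错误，便于测试与上层稳定匹配。
--
--     使用示例:
--     - raise TilePassError("TilePassUnsupportedOp: module has reduce op")
--
--     关联文件:
--     - spec: [spec/pass/lowering/tile.md](spec/pass/lowering/tile.md)
--     - test: [test/pass/test_lowering_tile.py](test/pass/test_lowering_tile.py)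
--     - 功能实现: [kernel_gen/passes/lowering/tile.py](kernel_gen/passes/lowering/tile.py)
--     """
--
-- def _raise_tile_error(keyword: str, detail: str) -> None:
--     """抛出统一格式的 tile 错误。
--
--     创建者: 小李飞刀
--     最后一次更改: 小李飞刀
--
--     功能说明:
--     - 统一拼接 `TilePass*` 前缀，避免不同路径返回不一致短语。
--
--     使用示例:
--     - _raise_tile_error("TilePassUnsupportedOp", "reduce is not supported")
--
--     关联文件:
--     - spec: [spec/pass/lowering/tile.md](spec/pass/lowering/tile.md)
--     - test: [test/pass/test_lowering_tile.py](test/pass/test_lowering_tile.py)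
--     - 功能实现: [kernel_gen/passes/lowering/tile.py](kernel_gen/passes/lowering/tile.py)
--     """
--
--     raise TilePassError(f"{keyword}: {detail}")
--
-- def _loop_axes_from_roles(roles: list[list[str]]) -> list[int]:
--     """从角色矩阵推导需要 loop 的轴。
--
--     创建者: 金铲铲大作战
--     最后一次更改: 金铲铲大作战
--
--     功能说明:
--     - 当所有 operand 在某个轴上均为 `elewise` 时，该轴进入 loop。
--     - 其他角色组合（包含 `expand`）不会生成 loop。
--
--     使用示例:
--     - loop_axes = _loop_axes_from_roles([["elewise", "elewise"], ["expand", "elewise"]])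
--
--     关联文件:
--     - spec: [spec/pass/lowering/tile.md](spec/pass/lowering/tile.md)
--     - test: [test/pass/test_lowering_tile.py](test/pass/test_lowering_tile.py)
--     - 功能实现: [kernel_gen/passes/lowering/tile.py](kernel_gen/passes/lowering/tile.py)
--     """
--
--     if not roles:
--         return []
--     rank = len(roles[0])
--     for row in roles:
--         if len(row) != rank:
--             _raise_tile_error("TilePassRankMismatch", "tile.analysis roles must share the same rank")
--     loop_axes: list[int] = []
--     for axis in range(rank):
--         if all(row[axis] == "elewise" for row in roles):
--             loop_axes.append(axis)
--     return loop_axes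
-- ===== SOURCE B (Python) =====
-- class TilePassError(ValueError):
--     pass
--
--
-- def _raise_tile_error(keyword: str, detail: str) -> None:
--     raise TilePassError(f"{keyword}: {detail}")
--
--
-- def _loop_axes_from_roles(roles: list[list[str]]) -> list[int]:
--     if not roles:
--         return []
--     rank = len(roles[0])
--     for row in roles:
--         if len(row) != rank:
--             _raise_tile_error("TilePassRankMismatch", "tile.analysis roles must share the same rank")
--     candidate = set(range(rank))
--     for row in roles:
--         candidate &= {i for i, v in enumerate(row) if v == "elewise"}
--     return sorted(candidate)
-- ===== Notes on version B (the rewrite author's own statement) =====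
-- stated objective: alternative
-- what changed: Instead of scanning every row once per axis (axis-major all() checks), B builds candidate = set(range(rank)) and makes one row-major pass intersecting it with each row's elewise-index set, then returns sorted(candidate).
import Mathlib
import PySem

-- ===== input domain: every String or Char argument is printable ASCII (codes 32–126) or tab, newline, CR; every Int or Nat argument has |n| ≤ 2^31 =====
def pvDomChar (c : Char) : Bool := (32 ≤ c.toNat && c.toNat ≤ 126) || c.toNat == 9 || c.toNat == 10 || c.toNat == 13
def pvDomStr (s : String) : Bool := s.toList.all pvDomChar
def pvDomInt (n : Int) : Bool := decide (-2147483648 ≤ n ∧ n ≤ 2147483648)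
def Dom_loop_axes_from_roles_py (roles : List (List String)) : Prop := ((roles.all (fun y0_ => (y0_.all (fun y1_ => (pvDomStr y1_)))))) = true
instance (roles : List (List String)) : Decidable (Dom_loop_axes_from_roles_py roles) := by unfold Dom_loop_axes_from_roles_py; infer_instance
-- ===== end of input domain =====

-- B replaces A's axis-major all()-scan by one row-major pass that shrinks a candidate set
-- of axes by intersection and returns the sorted survivors (objective: alternative).

-- ===== PORT A =====
-- axis-major: for axis in range(rank): if all(row[axis] == "elewise" for row in roles): append
def loop_axes_from_roles_py (roles : List (List String)) : List Int :=
  match roles with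
  | [] => []
  | r0 :: _ =>
    let rank : Int := r0.length
    -- the rank-validation loop raises TilePassError on a ragged row (outside Pre_); [] there
    if roles.all (fun row => (row.length : Int) == rank) then
      (PySem.List.pyRange 0 rank 1).foldl
        (fun acc axis =>
          if roles.all (fun row => PySem.List.pyGet? row axis == some "elewise")
          then acc ++ [axis] else acc) []
    else []

-- ===== PORT B =====
-- row-major: candidate = set(range(rank)); per row candidate &= {i for i, v in enumerate(row) if v == "elewise"}; sorted(candidate)
def loop_axes_from_roles_py_alt (roles : List (List String)) : List Int :=
  match roles with
  | [] => []
  | r0 :: _ =>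
    let rank : Int := r0.length
    -- same rank-validation loop as in Source B (raises on ragged rows, outside Pre_); [] there
    if roles.all (fun row => (row.length : Int) == rank) then
      let cand := roles.foldl
        (fun c row =>
          let s := (PySem.List.enumerate row 0).filterMap
            (fun p => if p.2 == "elewise" then some p.1 else none)
          c.filter (fun i => s.contains i))
        (PySem.List.pyRange 0 rank 1)
      PySem.List.sorted cand (fun x => x) false
    else []

-- ===== PRECONDITION & SPEC =====
-- Pre_ excludes ragged inputs (a row whose length differs from the first row's), on which
-- the Python A raises TilePassError (a ValueError); B raises the same error there.
def Pre_loop_axes_from_roles_py (roles : List (List String)) : Prop :=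
  ∀ row ∈ roles, row.length = (roles.headD []).length
instance (roles : List (List String)) : Decidable (Pre_loop_axes_from_roles_py roles) := by
  unfold Pre_loop_axes_from_roles_py; infer_instance

def pvWitness_loop_axes_from_roles_py : List (List String) :=
  [["elewise", "expand"], ["elewise", "elewise"]]

def Spec_loop_axes_from_roles_py (roles : List (List String)) (out : List Int) : Prop := out = loop_axes_from_roles_py_alt roles
instance (roles : List (List String)) (out : List Int) : Decidable (Spec_loop_axes_from_roles_py roles out) := by unfold Spec_loop_axes_from_roles_py; infer_instance

-- ===== CLAIM (what is proved, stated in full; the proofs are below) =====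
def Claim_equal_loop_axes_from_roles_py : Prop := ∀ (roles : List (List String)), Dom_loop_axes_from_roles_py roles → Pre_loop_axes_from_roles_py roles → Spec_loop_axes_from_roles_py roles (loop_axes_from_roles_py roles)

-- ===== LEMMAS AND PROOFS =====

theorem all_congr_mem {α : Type} (l : List α) (p q : α → Bool)
    (h : ∀ x ∈ l, p x = q x) : l.all p = l.all q := by
  induction l with
  | nil => rfl
  | cons x xs ih => simp [List.all_cons, h x (by simp), ih (fun y hy => h y (by simp [hy]))]

-- folding per-row intersections equals one filter by the conjunction over all rows
theorem foldl_filter_eq_filter_all {α β : Type} (rows : List β) (q : β → α → Bool)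
    (init : List α) :
    rows.foldl (fun c row => c.filter (q row))
      init = init.filter (fun i => rows.all (fun row => q row i)) := by
  induction rows generalizing init with
  | nil => simp
  | cons r rs ih => simp [ih, List.filter_filter, Bool.and_comm]

-- membership in a row's elewise-index set equals A's pyGet? test, for an in-range axis
theorem contains_elewise_iff (row : List String) (i : Int) (h0 : 0 ≤ i)
    (hlt : i < (row.length : Int)) :
    ((PySem.List.enumerate row 0).filterMap
        (fun p => if p.2 == "elewise" then some p.1 else none)).contains i
      = (PySem.List.pyGet? row i == some "elewise") := by
  have hi : i.toNat < row.length := by omega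
  rw [PySem.List.pyGet?_of_nonneg row h0, Bool.eq_iff_iff]
  simp only [List.contains_iff_mem, List.mem_filterMap, Option.ite_none_right_eq_some,
    Option.some.injEq, PySem.List.mem_enumerate_iff, List.getElem?_eq_getElem hi,
    beq_iff_eq]
  constructor
  · rintro ⟨p, ⟨⟨k, hk, rfl⟩, he, hik⟩⟩
    simp at hik
    have : i.toNat = k := by omega
    simpa [this] using he
  · intro h
    exact ⟨(i, row[i.toNat]), ⟨i.toNat, hi, by simp [Int.toNat_of_nonneg h0]⟩, h, rfl⟩

-- ===== VERDICT (by name: the statement is the Claim_ definition above) =====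
theorem loop_axes_from_roles_py_spec : Claim_equal_loop_axes_from_roles_py := by
  intro roles _ hpre
  unfold Spec_loop_axes_from_roles_py
  match roles with
  | [] => rfl
  | r0 :: rest =>
    simp only [loop_axes_from_roles_py, loop_axes_from_roles_py_alt]
    set roles := r0 :: rest with hroles
    have hlen : ∀ row ∈ roles, row.length = r0.length := by
      intro row hr; simpa using hpre row hr
    have hguard : roles.all (fun row => (row.length : Int) == (r0.length : Int)) = true := by
      simp only [List.all_eq_true, beq_iff_eq]
      intro row hr; exact_mod_cast hlen row hr
    rw [hguard]
    simp only [if_pos]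
    rw [PySem.List.foldl_append_if_eq_filter, List.nil_append]
    rw [foldl_filter_eq_filter_all]
    have hcongr : List.filter
        (fun i => roles.all fun row =>
          ((PySem.List.enumerate row 0).filterMap
            (fun p => if p.2 == "elewise" then some p.1 else none)).contains i)
        (PySem.List.pyRange 0 (r0.length : Int) 1)
        = List.filter
        (fun i => roles.all fun row => PySem.List.pyGet? row i == some "elewise")
        (PySem.List.pyRange 0 (r0.length : Int) 1) := by
      apply List.filter_congr
      intro i hi
      have hb := (PySem.List.mem_pyRange_one).mp hi
      apply all_congr_mem
      intro row hr
      apply contains_elewise_iff row i hb.1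
      rw [hlen row hr]
      exact hb.2
    rw [hcongr]
    exact (PySem.List.sorted_eq_of_perm_of_pairwise_lt _ _ _ (List.Perm.refl _)
      ((PySem.List.pairwise_lt_pyRange_one 0 (r0.length : Int)).sublist (List.filter_sublist))).symm
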